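-- pv_equiv track=rewrite | github.com/vaisakh25/Profiler_Agentic | file_profiler/connectors/uri_parser.py | _is_pg_keyword_format
-- ===== SOURCE A (Python) =====
-- _PG_CONNSTRING_KEYWORDS = frozenset({
--     "host", "hostaddr", "port", "dbname", "user", "password",
--     "connect_timeout", "client_encoding", "options", "application_name",
--     "fallback_application_name", "keepalives", "keepalives_idle",
--     "keepalives_interval", "keepalives_count", "tcp_user_timeout",
--     "sslmode", "sslcert", "sslkey", "sslrootcert", "sslcrl", "sslcompression",
--     "requiressl", "gssencmode", "krbsrvname", "gsslib", "service",
--     "target_session_attrs", "channel_binding"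
-- })
--
-- def _is_pg_keyword_format(uri: str) -> bool:
--     """Check if a string is a PostgreSQL keyword/value connection string.
--
--     Detects formats like: host=localhost port=5432 dbname=mydb user=postgres
--
--     Returns True if the string contains PostgreSQL connection keywords and
--     does NOT contain a scheme (no ://).
--     """
--     if "://" in uri:
--         return False
--
--     # Check if string contains any PostgreSQL keywords with = assignment
--     lower = uri.lower()
--     for keyword in _PG_CONNSTRING_KEYWORDS:
--         if f"{keyword}=" in lower:
--             return True
--
--     return False
-- ===== SOURCE B (Python) =====
-- _PG_CONNSTRING_KEYWORDS = frozenset({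
--     "host", "hostaddr", "port", "dbname", "user", "password",
--     "connect_timeout", "client_encoding", "options", "application_name",
--     "fallback_application_name", "keepalives", "keepalives_idle",
--     "keepalives_interval", "keepalives_count", "tcp_user_timeout",
--     "sslmode", "sslcert", "sslkey", "sslrootcert", "sslcrl", "sslcompression",
--     "requiressl", "gssencmode", "krbsrvname", "gsslib", "service",
--     "target_session_attrs", "channel_binding"
-- })
--
-- # the distinct keyword lengths
-- _KW_LENS = (4, 6, 7, 8, 10, 11, 14, 15, 16, 19, 20, 25)
--
--
-- def _is_pg_keyword_format(uri: str) -> bool: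
--     """Single left-to-right scan: at each '=' check whether one of the
--     possible keyword lengths yields a keyword ending right before it."""
--     if "://" in uri:
--         return False
--     lower = uri.lower()
--     for i, ch in enumerate(lower):
--         if ch == "=":
--             for L in _KW_LENS:
--                 if L <= i and lower[i - L:i] in _PG_CONNSTRING_KEYWORDS:
--                     return True
--     return False
-- ===== Notes on version B (the rewrite author's own statement) =====
-- stated objective: alternative
-- what changed: Instead of running 29 independent keyword-substring searches over the lowered string, B makes one left-to-right scan and, at each equals sign, tests whether a keyword of one of the 12 possible lengths ends right before it via set membership.
import Mathlib
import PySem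

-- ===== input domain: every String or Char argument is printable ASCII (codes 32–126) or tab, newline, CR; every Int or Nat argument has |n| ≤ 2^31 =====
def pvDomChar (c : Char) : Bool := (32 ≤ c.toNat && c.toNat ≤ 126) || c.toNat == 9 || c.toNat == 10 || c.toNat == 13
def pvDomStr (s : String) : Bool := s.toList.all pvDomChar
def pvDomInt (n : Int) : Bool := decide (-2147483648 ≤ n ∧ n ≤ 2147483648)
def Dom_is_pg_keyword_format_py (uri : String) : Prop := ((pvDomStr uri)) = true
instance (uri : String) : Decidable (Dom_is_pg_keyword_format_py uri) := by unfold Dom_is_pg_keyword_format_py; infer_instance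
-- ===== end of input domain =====

-- B replaces A's 29 independent substring searches by one left-to-right scan that, at each '=',
-- checks the candidate keyword lengths against the keyword set (objective: alternative traversal).

-- ===== PORT A =====
def pvKeywords : List String :=
  ["host", "hostaddr", "port", "dbname", "user", "password",
   "connect_timeout", "client_encoding", "options", "application_name",
   "fallback_application_name", "keepalives", "keepalives_idle",
   "keepalives_interval", "keepalives_count", "tcp_user_timeout",
   "sslmode", "sslcert", "sslkey", "sslrootcert", "sslcrl", "sslcompression",
   "requiressl", "gssencmode", "krbsrvname", "gsslib", "service",
   "target_session_attrs", "channel_binding"]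

def is_pg_keyword_format_py (uri : String) : Bool :=
  if PySem.Str.isIn "://" uri then false
  else
    let lower := PySem.Str.lower uri
    pvKeywords.any (fun k => PySem.Str.isIn (k ++ "=") lower)

-- ===== PORT B =====
def pvKWLens : List Int := [4, 6, 7, 8, 10, 11, 14, 15, 16, 19, 20, 25]

def pvKeywordsL : List (List Char) := pvKeywords.map String.toList

def is_pg_keyword_format_py_alt (uri : String) : Bool :=
  if PySem.Str.isIn "://" uri then false
  else
    let s := (PySem.Str.lower uri).toList
    (PySem.List.enumerate s 0).any (fun p =>
      p.2 == '=' && pvKWLens.any (fun L =>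
        decide (L ≤ p.1) &&
          pvKeywordsL.contains (PySem.List.slice s (some (p.1 - L)) (some p.1))))

-- ===== PRECONDITION & SPEC =====
def Spec_is_pg_keyword_format_py (uri : String) (out : Bool) : Prop := out = is_pg_keyword_format_py_alt uri
instance (uri : String) (out : Bool) : Decidable (Spec_is_pg_keyword_format_py uri out) := by unfold Spec_is_pg_keyword_format_py; infer_instance

-- ===== CLAIM (what is proved, stated in full; the proofs are below) =====
def Claim_equal_is_pg_keyword_format_py : Prop := ∀ (uri : String), Dom_is_pg_keyword_format_py uri → Spec_is_pg_keyword_format_py uri (is_pg_keyword_format_py uri)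

-- ===== LEMMAS AND PROOFS =====

lemma pv_len_mem : ∀ k ∈ pvKeywords, (k.toList.length : Int) ∈ pvKWLens := by decide
lemma pv_lens_nonneg : ∀ L ∈ pvKWLens, 0 ≤ L := by decide

lemma pv_any_eq (s : List Char) :
    (pvKeywords.any (fun k => PySem.Chars.isIn (k.toList ++ ['=']) s)) =
    ((PySem.List.enumerate s 0).any (fun p =>
      p.2 == '=' && pvKWLens.any (fun L =>
        decide (L ≤ p.1) &&
          decide (PySem.List.slice s (some (p.1 - L)) (some p.1) ∈ pvKeywordsL)))) := by
  rw [Bool.eq_iff_iff]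
  simp only [List.any_eq_true, Bool.and_eq_true, beq_iff_eq, decide_eq_true_eq,
    PySem.Chars.isIn_iff_infix, PySem.List.mem_enumerate_iff]
  constructor
  · rintro ⟨k, hk, t₁, t₂, hs⟩
    subst hs
    set kl := k.toList with hkl
    set s := t₁ ++ (kl ++ ['=']) ++ t₂ with hs
    set i := t₁.length + kl.length with hidef
    have hi : i < s.length := by simp [hs, hidef]
    have heq' : s[i]? = some '=' := by
      simp only [hs, hidef, List.append_assoc]
      rw [List.getElem?_append_right (by simp)]
      rw [Nat.add_sub_cancel_left]
      rw [List.getElem?_append_right (by simp)]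
      simp
    have heq : s[i] = '=' := by
      rw [List.getElem?_eq_getElem hi] at heq'
      exact Option.some.inj heq'
    refine ⟨(((i : Nat) : Int), s[i]), ⟨i, hi, by simp⟩,
      heq, (kl.length : Int), pv_len_mem k hk, ?_, ?_⟩
    · simp only [hidef]; push_cast; omega
    · have h0 : ((i : Nat) : Int) - (kl.length : Int) = ((t₁.length : Nat) : Int) := by
        simp only [hidef]; push_cast; ring
      simp only [h0]
      rw [PySem.List.slice_toNat _ (by positivity) (by positivity)]
      simp only [Int.toNat_natCast, hidef, hs]
      rw [List.append_assoc, List.drop_left]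
      have h1 : kl ++ ['='] ++ t₂ = kl ++ (['='] ++ t₂) := by simp
      rw [h1, Nat.add_sub_cancel_left, List.take_left]
      exact List.mem_map.mpr ⟨k, hk, rfl⟩
  · rintro ⟨p, ⟨i, hi, rfl⟩, heq, L, hL, hLle, hmem⟩
    simp only [zero_add] at heq hLle hmem
    have hL0 : 0 ≤ L := pv_lens_nonneg L hL
    have hLt : L.toNat ≤ i := by omega
    rw [PySem.List.slice_toNat _ (by omega) (by positivity)] at hmem
    have ht1 : ((i : Int) - L).toNat = i - L.toNat := by omega
    have ht2 : ((i : Int)).toNat = i := by omega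
    rw [ht1, ht2] at hmem
    obtain ⟨k, hk, hkl⟩ := List.mem_map.mp hmem
    refine ⟨k, hk, s.take (i - L.toNat), s.drop (i + 1), ?_⟩
    rw [hkl]
    have hdrop : s.drop (i - L.toNat) = (s.drop (i - L.toNat)).take (i - (i - L.toNat)) ++ s.drop i := by
      conv_lhs => rw [← List.take_append_drop (i - (i - L.toNat)) (s.drop (i - L.toNat))]
      rw [List.drop_drop]
      have h2 : i - L.toNat + (i - (i - L.toNat)) = i := by omega
      rw [h2]
    have hdropi : s.drop i = '=' :: s.drop (i + 1) := by
      rw [List.drop_eq_getElem_cons hi, heq]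
    calc s.take (i - L.toNat) ++ ((s.drop (i - L.toNat)).take (i - (i - L.toNat)) ++ ['=']) ++ s.drop (i + 1)
        = s.take (i - L.toNat) ++ ((s.drop (i - L.toNat)).take (i - (i - L.toNat)) ++ ('=' :: s.drop (i + 1))) := by simp
      _ = s.take (i - L.toNat) ++ ((s.drop (i - L.toNat)).take (i - (i - L.toNat)) ++ s.drop i) := by rw [hdropi]
      _ = s.take (i - L.toNat) ++ s.drop (i - L.toNat) := by rw [← hdrop]
      _ = s := List.take_append_drop _ _

-- ===== VERDICT (by name: the statement is the Claim_ definition above) =====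
theorem is_pg_keyword_format_py_spec : Claim_equal_is_pg_keyword_format_py := by
  intro uri _
  unfold Spec_is_pg_keyword_format_py is_pg_keyword_format_py is_pg_keyword_format_py_alt
  simp
  rw [pv_any_eq]
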